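-- pv_equiv track=rewrite | github.com/Aayan-Mishra/LovelaceCode | src/lovelace_code/tools/repo_tools.py | chunk_content_generator
-- ===== SOURCE A (Python) =====
-- def chunk_content_generator(content: str, file_path: str, chunk_size: int = 1000) -> list[tuple[str, str]]:
--     """Split content into chunks for semantic search."""
--     chunks = []
--     lines = content.splitlines(keepends=True)
--
--     current_chunk = []
--     current_size = 0
--     chunk_start = 1
--
--     for i, line in enumerate(lines, 1):
--         current_chunk.append(line)
--         current_size += len(line)
--
--         if current_size >= chunk_size:
--             current_chunk_content = "".join(current_chunk)
--             chunk_id = f"{file_path}:{chunk_start}-{i}"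
--             chunks.append((chunk_id, current_chunk_content))
--             current_chunk = []
--             current_size = 0
--             chunk_start = i + 1
--
--     # Remaining content
--     if current_chunk:
--         current_chunk_content = "".join(current_chunk)
--         chunk_id = f"{file_path}:{chunk_start}-{len(lines)}"
--         chunks.append((chunk_id, current_chunk_content))
--
--     return chunks
-- ===== SOURCE B (Python) =====
-- def chunk_content_generator(content: str, file_path: str, chunk_size: int = 1000) -> list[tuple[str, str]]:
--     """Split content into chunks via a prefix-sum table and per-chunk binary search."""
--     lines = content.splitlines(keepends=True)
--     n = len(lines)
--     prefix = [0]
--     for line in lines: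
--         prefix.append(prefix[-1] + len(line))
--     chunks = []
--     start = 1
--     while start <= n:
--         target = prefix[start - 1] + chunk_size
--         if prefix[n] < target:
--             end = n
--         else:
--             lo, hi = start, n
--             while lo < hi:
--                 mid = (lo + hi) // 2
--                 if prefix[mid] >= target:
--                     hi = mid
--                 else:
--                     lo = mid + 1
--             end = lo
--         chunks.append((f"{file_path}:{start}-{end}", "".join(lines[start - 1:end])))
--         start = end + 1
--     return chunks
-- ===== Notes on version B (the rewrite author's own statement) =====
-- stated objective: alternative
-- what changed: Replaces A's single greedy accumulate-and-emit loop (growing current_chunk buffer, joined at each cut) by building a prefix-sum table of line lengths once and then finding each chunk's end boundary with a binary search over that table, slicing the line list per chunk.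
import Mathlib
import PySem

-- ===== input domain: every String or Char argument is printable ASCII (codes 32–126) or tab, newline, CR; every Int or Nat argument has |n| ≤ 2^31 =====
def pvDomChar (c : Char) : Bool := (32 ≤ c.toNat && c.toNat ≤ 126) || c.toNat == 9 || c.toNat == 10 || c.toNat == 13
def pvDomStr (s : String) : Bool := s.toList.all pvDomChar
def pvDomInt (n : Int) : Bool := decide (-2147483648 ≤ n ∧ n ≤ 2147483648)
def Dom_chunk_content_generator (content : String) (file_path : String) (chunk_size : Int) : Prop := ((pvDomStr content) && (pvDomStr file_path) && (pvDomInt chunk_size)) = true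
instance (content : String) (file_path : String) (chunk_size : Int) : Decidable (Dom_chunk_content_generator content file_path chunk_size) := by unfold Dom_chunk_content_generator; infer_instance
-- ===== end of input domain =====

-- B replaces A's greedy accumulate-and-emit pass by a prefix-sum table built once plus a
-- binary search for each chunk's end boundary (alternative algorithm, similar cost).

-- content.splitlines(keepends=True): exact on the Dom alphabet, whose only
-- Python line terminators are '\n', '\r' and '\r\n'.
def pySplitKE : List Char → List (List Char)
  | [] => []
  | '\r' :: '\n' :: rest => ['\r', '\n'] :: pySplitKE rest
  | c :: rest =>
    if c = '\n' then ['\n'] :: pySplitKE rest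
    else if c = '\r' then ['\r'] :: pySplitKE rest
    else
      match pySplitKE rest with
      | [] => [[c]]
      | l :: ls => (c :: l) :: ls

-- ===== PORT A =====
-- the for-loop of A: state (chunks, current_chunk, current_size, chunk_start), i the 1-based index
def chunkA_go (fp : String) (cs : Int) : List (List Char) → Nat → List (String × String) → List (List Char) → Nat → Nat → List (String × String) × List (List Char) × Nat
  | [], _, chunks, cur, _, start => (chunks, cur, start)
  | l :: rest, i, chunks, cur, size, start =>
    let cur' := cur ++ [l]
    let size' := size + l.length
    if (size' : Int) ≥ cs then
      chunkA_go fp cs rest (i + 1)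
        (chunks ++ [(fp ++ ":" ++ PySem.Int.toStr (start : Int) ++ "-" ++ PySem.Int.toStr (i : Int), String.ofList cur'.flatten)])
        [] 0 (i + 1)
    else
      chunkA_go fp cs rest (i + 1) chunks cur' size' start

def chunk_content_generator (content : String) (file_path : String) (chunk_size : Int) : List (String × String) :=
  let lines := pySplitKE content.toList
  let r := chunkA_go file_path chunk_size lines 1 [] [] 0 1
  if r.2.1 ≠ [] then
    r.1 ++ [(file_path ++ ":" ++ PySem.Int.toStr (r.2.2 : Int) ++ "-" ++ PySem.Int.toStr (lines.length : Int), String.ofList r.2.1.flatten)]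
  else r.1

-- ===== PORT B =====
-- the prefix-building loop of Source B (carrying prefix[-1] as the accumulator); prefix = 0 :: buildPrefix lines 0
def buildPrefix : List (List Char) → Nat → List Nat
  | [], _ => []
  | l :: rest, acc => (acc + l.length) :: buildPrefix rest (acc + l.length)

-- Source B's inner 'while lo < hi' binary search (fuel = a bound on the iteration count,
-- a totality guard only: hi - lo shrinks every iteration, so hi - lo iterations suffice)
def bsearchB (p : List Nat) (target : Int) : Nat → Nat → Nat → Nat
  | 0, lo, _ => lo
  | fuel + 1, lo, hi =>
    if lo < hi then
      if (p.getD ((lo + hi) / 2) 0 : Int) ≥ target then bsearchB p target fuel lo ((lo + hi) / 2)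
      else bsearchB p target fuel ((lo + hi) / 2 + 1) hi
    else lo

-- Source B's outer 'while start <= n' loop (fuel: start strictly increases each iteration,
-- so lines.length + 1 iterations suffice)
def chunkB_build (fp : String) (cs : Int) (lines : List (List Char)) (p : List Nat) : Nat → Nat → List (String × String)
  | 0, _ => []
  | fuel + 1, start =>
    if start ≤ lines.length then
      let target : Int := (p.getD (start - 1) 0 : Int) + cs
      let e := if (p.getD lines.length 0 : Int) < target then lines.length
               else bsearchB p target (lines.length - start) start lines.length
      (fp ++ ":" ++ PySem.Int.toStr (start : Int) ++ "-" ++ PySem.Int.toStr (e : Int),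
       String.ofList (PySem.List.slice lines (some ((start : Int) - 1)) (some (e : Int))).flatten)
        :: chunkB_build fp cs lines p fuel (e + 1)
    else []

def chunk_content_generator_alt (content : String) (file_path : String) (chunk_size : Int) : List (String × String) :=
  let lines := pySplitKE content.toList
  let p := 0 :: buildPrefix lines 0
  chunkB_build file_path chunk_size lines p (lines.length + 1) 1

-- ===== PRECONDITION & SPEC =====
def Spec_chunk_content_generator (content : String) (file_path : String) (chunk_size : Int) (out : List (String × String)) : Prop := out = chunk_content_generator_alt content file_path chunk_size
instance (content : String) (file_path : String) (chunk_size : Int) (out : List (String × String)) : Decidable (Spec_chunk_content_generator content file_path chunk_size out) := by unfold Spec_chunk_content_generator; infer_instance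

-- ===== CLAIM (what is proved, stated in full; the proofs are below) =====
def Claim_equal_chunk_content_generator : Prop := ∀ (content : String) (file_path : String) (chunk_size : Int), Dom_chunk_content_generator content file_path chunk_size → Spec_chunk_content_generator content file_path chunk_size (chunk_content_generator content file_path chunk_size)

-- ===== LEMMAS AND PROOFS =====

-- proof-side linear boundary scanner: the common reference both ports are reduced to
def chunkB_bounds (cs : Int) : List (List Char) → Nat → Nat → Nat → List (Nat × Nat) × Nat
  | [], _, start, _ => ([], start)
  | l :: rest, i, start, size =>
    let size' := size + l.length
    if (size' : Int) ≥ cs then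
      let r := chunkB_bounds cs rest (i + 1) (i + 1) 0
      ((start, i) :: r.1, r.2)
    else
      chunkB_bounds cs rest (i + 1) start size'

-- the chunk built from a boundary pair
def fChunk (fp : String) (lines : List (List Char)) (p : Nat × Nat) : String × String :=
  (fp ++ ":" ++ PySem.Int.toStr (p.1 : Int) ++ "-" ++ PySem.Int.toStr (p.2 : Int),
   String.ofList (PySem.List.slice lines (some ((p.1 : Int) - 1)) (some (p.2 : Int))).flatten)

def sumLen (ls : List (List Char)) : Nat := (ls.map List.length).sum

theorem chunkB_bounds_snd_le (cs : Int) (ls : List (List Char)) (i start size : Nat)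
    (h : start ≤ i) : start ≤ (chunkB_bounds cs ls i start size).2 ∧ (chunkB_bounds cs ls i start size).2 ≤ i + ls.length := by
  induction ls generalizing i start size with
  | nil => simpa [chunkB_bounds] using h
  | cons l rest ih =>
    simp only [chunkB_bounds]
    split
    · have := ih (i + 1) (i + 1) 0 (le_refl _)
      refine ⟨by omega, ?_⟩
      simpa [Nat.add_comm, Nat.add_left_comm] using this.2
    · have := ih (i + 1) start (size + l.length) (by omega)
      refine ⟨this.1, ?_⟩
      simpa [Nat.add_comm, Nat.add_left_comm] using this.2

theorem chunk_key (fp : String) (cs : Int) (lines : List (List Char)) (ls : List (List Char))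
    (i start size : Nat) (chunks : List (String × String))
    (hstart : 1 ≤ start) (hsi : start ≤ i) (hls : ls = lines.drop (i - 1)) :
    chunkA_go fp cs ls i chunks ((lines.drop (start - 1)).take (i - start)) size start =
      (chunks ++ (chunkB_bounds cs ls i start size).1.map (fChunk fp lines),
        (lines.drop ((chunkB_bounds cs ls i start size).2 - 1)).take (i + ls.length - (chunkB_bounds cs ls i start size).2),
        (chunkB_bounds cs ls i start size).2) := by
  induction ls generalizing i start size chunks with
  | nil =>
    simp [chunkA_go, chunkB_bounds]
  | cons l rest ih =>
    have hi : 1 ≤ i := le_trans hstart hsi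
    have hlen : i - 1 < lines.length := by
      have hne : lines.drop (i - 1) ≠ [] := by rw [← hls]; simp
      rw [ne_eq, List.drop_eq_nil_iff] at hne
      omega
    have hl : lines[i - 1]? = some l := by
      have h0 : (lines.drop (i - 1))[0]? = some l := by rw [← hls]; rfl
      rwa [List.getElem?_drop, Nat.add_zero] at h0
    have hcur' : (lines.drop (start - 1)).take (i - start) ++ [l] =
        (lines.drop (start - 1)).take (i + 1 - start) := by
      rw [show i + 1 - start = (i - start) + 1 from by omega, List.take_add_one]
      have h2 : (lines.drop (start - 1))[i - start]? = some l := by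
        rw [List.getElem?_drop, show start - 1 + (i - start) = i - 1 from by omega]
        exact hl
      simp [h2]
    have hrest : rest = lines.drop (i + 1 - 1) := by
      have h1 : lines.drop (i - 1 + 1) = (lines.drop (i - 1)).tail := by rw [List.tail_drop]
      rw [show i + 1 - 1 = i - 1 + 1 from by omega, h1, ← hls]
      rfl
    simp only [chunkA_go, chunkB_bounds]
    split
    · -- cut here: size' ≥ cs
      have hkey := ih (i + 1) (i + 1) 0 (chunks ++ [(fp ++ ":" ++ PySem.Int.toStr (start : Int) ++ "-" ++ PySem.Int.toStr (i : Int), String.ofList ((lines.drop (start - 1)).take (i - start) ++ [l]).flatten)]) (by omega) (le_refl _) hrest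
      rw [show (lines.drop ((i + 1) - 1)).take ((i + 1) - (i + 1)) = [] from by simp] at hkey
      rw [hcur'] at hkey
      rw [hcur', hkey]
      have hslice : PySem.List.slice lines (some ((start : Int) - 1)) (some (i : Int)) =
          (lines.drop (start - 1)).take (i + 1 - start) := by
        rw [PySem.List.slice_toNat _ (by omega) (by omega)]
        rw [show ((start : Int) - 1).toNat = start - 1 from by omega,
            show ((i : Int)).toNat = i from by omega]
        congr 1
        omega
      have harith : i + 1 + rest.length = i + (l :: rest).length := by simp; omega
      simp [fChunk, hslice, harith, List.append_assoc]
    · -- no cut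
      have hkey := ih (i + 1) start (size + l.length) chunks hstart (by omega) hrest
      rw [hcur', hkey]
      have harith : i + 1 + rest.length = i + (l :: rest).length := by simp; omega
      simp [harith]

theorem sumLen_append (a b : List (List Char)) : sumLen (a ++ b) = sumLen a + sumLen b := by
  simp [sumLen]

theorem sumLen_take_le (l : List (List Char)) (j : Nat) : sumLen (l.take j) ≤ sumLen l := by
  conv_rhs => rw [← List.take_append_drop j l]
  rw [sumLen_append]
  omega

theorem S_mono (lines : List (List Char)) {j k : Nat} (h : j ≤ k) :
    sumLen (lines.take j) ≤ sumLen (lines.take k) := by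
  have h1 : (lines.take k).take j = lines.take j := by
    rw [List.take_take]
    congr 1
    omega
  calc sumLen (lines.take j) = sumLen ((lines.take k).take j) := by rw [h1]
    _ ≤ sumLen (lines.take k) := sumLen_take_le _ _

theorem S_succ (lines : List (List Char)) {k : Nat} {l : List Char} (h : lines[k]? = some l) :
    sumLen (lines.take (k + 1)) = sumLen (lines.take k) + l.length := by
  rw [List.take_add_one, h]
  simp [sumLen]

theorem buildPrefix_getD : ∀ (ls : List (List Char)) (a k : Nat), k < ls.length →
    (buildPrefix ls a).getD k 0 = a + sumLen (ls.take (k + 1)) := by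
  intro ls
  induction ls with
  | nil => intro a k h; simp at h
  | cons l rest ih =>
    intro a k h
    cases k with
    | zero => simp [buildPrefix, sumLen]
    | succ k =>
      have := ih (a + l.length) k (by simpa using h)
      simp only [buildPrefix, List.getD_cons_succ, this, List.take_succ_cons]
      simp [sumLen]
      omega

theorem prefix_getD (lines : List (List Char)) (k : Nat) (h : k ≤ lines.length) :
    (0 :: buildPrefix lines 0).getD k 0 = sumLen (lines.take k) := by
  cases k with
  | zero => simp [sumLen]
  | succ k =>
    have := buildPrefix_getD lines 0 k (by omega)
    simpa using this

theorem p_mono (lines : List (List Char)) {j k : Nat} (hjk : j ≤ k) (hk : k ≤ lines.length) :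
    (0 :: buildPrefix lines 0).getD j 0 ≤ (0 :: buildPrefix lines 0).getD k 0 := by
  rw [prefix_getD lines j (by omega), prefix_getD lines k hk]
  exact S_mono lines hjk

-- proof-side linear search for the first index e in [i, hi] with p[e] ≥ t
def linCut (t : Int) (p : List Nat) (hi : Nat) (i : Nat) : Option Nat :=
  if i ≤ hi then
    (if (p.getD i 0 : Int) ≥ t then some i else linCut t p hi (i + 1))
  else none
termination_by hi + 1 - i
decreasing_by omega

theorem linCut_some (t : Int) (p : List Nat) (hi : Nat) : ∀ d i e, hi + 1 - i ≤ d →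
    linCut t p hi i = some e →
    i ≤ e ∧ e ≤ hi ∧ t ≤ (p.getD e 0 : Int) ∧ ∀ k, i ≤ k → k < e → (p.getD k 0 : Int) < t := by
  intro d
  induction d with
  | zero =>
    intro i e hd h
    rw [linCut] at h
    have : ¬ i ≤ hi := by omega
    simp [this] at h
  | succ d ih =>
    intro i e hd h
    rw [linCut] at h
    by_cases hih : i ≤ hi
    · rw [if_pos hih] at h
      by_cases hp : t ≤ (p.getD i 0 : Int)
      · rw [if_pos (by omega)] at h
        obtain rfl : i = e := by injection h
        exact ⟨le_refl _, hih, hp, fun k h1 h2 => absurd (lt_of_le_of_lt h1 h2) (lt_irrefl i)⟩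
      · rw [if_neg (by omega)] at h
        obtain ⟨h1, h2, h3, h4⟩ := ih (i + 1) e (by omega) h
        refine ⟨by omega, h2, h3, fun k hk1 hk2 => ?_⟩
        by_cases hki : k = i
        · subst hki; omega
        · exact h4 k (by omega) hk2
    · simp [hih] at h

theorem linCut_none (t : Int) (p : List Nat) (hi : Nat) : ∀ d i, hi + 1 - i ≤ d →
    linCut t p hi i = none → ∀ k, i ≤ k → k ≤ hi → (p.getD k 0 : Int) < t := by
  intro d
  induction d with
  | zero =>
    intro i hd h k hk1 hk2
    omega
  | succ d ih =>
    intro i hd h k hk1 hk2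
    rw [linCut] at h
    rw [if_pos (by omega)] at h
    by_cases hp : t ≤ (p.getD i 0 : Int)
    · rw [if_pos (by omega)] at h; exact absurd h (by simp)
    · rw [if_neg (by omega)] at h
      by_cases hki : k = i
      · subst hki; omega
      · exact ih (i + 1) (by omega) h k (by omega) hk2

theorem bsearchB_spec (p : List Nat) (t : Int) (N : Nat)
    (hmono : ∀ j k, j ≤ k → k ≤ N → p.getD j 0 ≤ p.getD k 0) :
    ∀ fuel lo hi, hi - lo ≤ fuel → lo ≤ hi → hi ≤ N → t ≤ (p.getD hi 0 : Int) →
    lo ≤ bsearchB p t fuel lo hi ∧ bsearchB p t fuel lo hi ≤ hi ∧ t ≤ (p.getD (bsearchB p t fuel lo hi) 0 : Int) ∧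
      ∀ k, lo ≤ k → k < bsearchB p t fuel lo hi → (p.getD k 0 : Int) < t := by
  intro fuel
  induction fuel with
  | zero =>
    intro lo hi hd hle hN hP
    obtain rfl : lo = hi := by omega
    exact ⟨le_refl _, le_refl _, hP, fun k h1 h2 => absurd (lt_of_le_of_lt h1 h2) (lt_irrefl lo)⟩
  | succ d ih =>
    intro lo hi hd hle hN hP
    simp only [bsearchB]
    by_cases hlt : lo < hi
    · rw [if_pos hlt]
      by_cases hmid : t ≤ (p.getD ((lo + hi) / 2) 0 : Int)
      · rw [if_pos (by omega)]
        obtain ⟨h1, h2, h3, h4⟩ := ih lo ((lo + hi) / 2) (by omega) (by omega) (by omega) hmid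
        exact ⟨h1, by omega, h3, h4⟩
      · rw [if_neg (by omega)]
        obtain ⟨h1, h2, h3, h4⟩ := ih ((lo + hi) / 2 + 1) hi (by omega) (by omega) hN hP
        refine ⟨by omega, h2, h3, fun k hk1 hk2 => ?_⟩
        by_cases hksmall : k ≤ (lo + hi) / 2
        · have := hmono k ((lo + hi) / 2) hksmall (by omega)
          omega
        · exact h4 k (by omega) hk2
    · rw [if_neg hlt]
      obtain rfl : lo = hi := by omega
      exact ⟨le_refl _, le_refl _, hP, fun k h1 h2 => absurd (lt_of_le_of_lt h1 h2) (lt_irrefl lo)⟩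

-- Source B's outer loop never revisits indices past the end
theorem chunkB_build_past (fp : String) (cs : Int) (lines : List (List Char)) (p : List Nat) :
    ∀ fuel start, lines.length < start → chunkB_build fp cs lines p fuel start = [] := by
  intro fuel start h
  cases fuel with
  | zero => rfl
  | succ d => simp only [chunkB_build]; rw [if_neg (by omega)]

-- one greedy segment of the linear scanner, characterised by linCut
theorem bounds_step (cs : Int) (lines : List (List Char)) :
    ∀ (ls : List (List Char)) (i start size : Nat), 1 ≤ start → start ≤ i →
    ls = lines.drop (i - 1) →
    sumLen (lines.take (i - 1)) = sumLen (lines.take (start - 1)) + size →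
    chunkB_bounds cs ls i start size =
      match linCut ((sumLen (lines.take (start - 1)) : Int) + cs) (0 :: buildPrefix lines 0) lines.length i with
      | some e => ((start, e) :: (chunkB_bounds cs (lines.drop e) (e + 1) (e + 1) 0).1,
                   (chunkB_bounds cs (lines.drop e) (e + 1) (e + 1) 0).2)
      | none => ([], start) := by
  intro ls
  induction ls with
  | nil =>
    intro i start size hstart hsi hls hsz
    have hlen : lines.length ≤ i - 1 := by
      have := hls.symm
      rw [List.drop_eq_nil_iff] at this
      exact this
    rw [linCut, if_neg (by omega)]
    simp [chunkB_bounds]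
  | cons l rest ih =>
    intro i start size hstart hsi hls hsz
    have hi : 1 ≤ i := le_trans hstart hsi
    have hlen : i - 1 < lines.length := by
      have hne : lines.drop (i - 1) ≠ [] := by rw [← hls]; simp
      rw [ne_eq, List.drop_eq_nil_iff] at hne
      omega
    have hl : lines[i - 1]? = some l := by
      have h0 : (lines.drop (i - 1))[0]? = some l := by rw [← hls]; rfl
      rwa [List.getElem?_drop, Nat.add_zero] at h0
    have hSi : sumLen (lines.take i) = sumLen (lines.take (start - 1)) + (size + l.length) := by
      have := S_succ lines (k := i - 1) hl
      rw [show i - 1 + 1 = i from by omega] at this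
      omega
    have hrest : rest = lines.drop (i + 1 - 1) := by
      have h1 : lines.drop (i - 1 + 1) = (lines.drop (i - 1)).tail := by rw [List.tail_drop]
      rw [show i + 1 - 1 = i - 1 + 1 from by omega, h1, ← hls]
      rfl
    have hpi : ((0 :: buildPrefix lines 0).getD i 0 : Int) = (sumLen (lines.take i) : Int) := by
      rw [prefix_getD lines i (by omega)]
    have hcond : ((size + l.length : Nat) : Int) ≥ cs ↔
        ((0 :: buildPrefix lines 0).getD i 0 : Int) ≥ (sumLen (lines.take (start - 1)) : Int) + cs := by
      rw [hpi, hSi]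
      push_cast
      omega
    rw [linCut, if_pos (by omega)]
    simp only [chunkB_bounds]
    by_cases hc : ((size + l.length : Nat) : Int) ≥ cs
    · rw [if_pos hc, if_pos (hcond.mp hc)]
      have hdi : lines.drop i = rest := by
        rw [hrest, show i + 1 - 1 = i from by omega]
      show _ = ((start, i) :: (chunkB_bounds cs (lines.drop i) (i + 1) (i + 1) 0).1,
                (chunkB_bounds cs (lines.drop i) (i + 1) (i + 1) 0).2)
      rw [hdi]
    · rw [if_neg hc, if_neg (fun h => hc (hcond.mpr h))]
      exact ih (i + 1) start (size + l.length) hstart (by omega) hrest (by rw [show i + 1 - 1 = i from by omega]; exact hSi)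

-- the linear scanner's output, mapped to chunks, is exactly Source B's binary-search build loop
theorem build_eq (fp : String) (cs : Int) (lines : List (List Char)) :
    ∀ d start, lines.length + 1 - start ≤ d → 1 ≤ start →
    ((chunkB_bounds cs (lines.drop (start - 1)) start start 0).1 ++
      (if (chunkB_bounds cs (lines.drop (start - 1)) start start 0).2 ≤ lines.length
       then [((chunkB_bounds cs (lines.drop (start - 1)) start start 0).2, lines.length)] else [])).map (fChunk fp lines)
    = chunkB_build fp cs lines (0 :: buildPrefix lines 0) d start := by
  intro d
  induction d with
  | zero =>
    intro start hd hstart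
    have hgt : ¬ start ≤ lines.length := by omega
    have hdrop : lines.drop (start - 1) = [] := by
      rw [List.drop_eq_nil_iff]; omega
    rw [show chunkB_build fp cs lines (0 :: buildPrefix lines 0) 0 start = [] from rfl, hdrop]
    simp [chunkB_bounds, hgt]
  | succ d ih =>
    intro start hd hstart
    by_cases hsn : start ≤ lines.length
    · have hstep := bounds_step cs lines (lines.drop (start - 1)) start start 0 hstart (le_refl _) rfl (by omega)
      set p := 0 :: buildPrefix lines 0 with hp
      set t : Int := (sumLen (lines.take (start - 1)) : Int) + cs with ht
      have htarget : (p.getD (start - 1) 0 : Int) + cs = t := by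
        rw [hp, prefix_getD lines (start - 1) (by omega)]
      simp only [chunkB_build]
      rw [if_pos hsn]
      simp only [htarget]
      cases hc : linCut t p lines.length start with
      | none =>
        rw [hc] at hstep
        have hnlt : (p.getD lines.length 0 : Int) < t :=
          linCut_none t p lines.length (lines.length + 1 - start) start (le_refl _) hc lines.length hsn (le_refl _)
        rw [if_pos hnlt]
        have hnext : chunkB_build fp cs lines p d (lines.length + 1) = [] := by
          exact chunkB_build_past fp cs lines p d (lines.length + 1) (by omega)
        rw [hnext, hstep]
        simp [hsn, fChunk]
      | some e =>
        rw [hc] at hstep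
        obtain ⟨he1, he2, he3, he4⟩ := linCut_some t p lines.length (lines.length + 1 - start) start e (le_refl _) hc
        have hPn : t ≤ (p.getD lines.length 0 : Int) := by
          calc t ≤ (p.getD e 0 : Int) := he3
            _ ≤ (p.getD lines.length 0 : Int) := by
                exact_mod_cast Int.ofNat_le.mpr (p_mono lines he2 (le_refl _))
        rw [if_neg (show ¬ (p.getD lines.length 0 : Int) < t by omega)]
        obtain ⟨hb1, hb2, hb3, hb4⟩ := bsearchB_spec p t lines.length
          (fun j k hjk hk => p_mono lines hjk hk) (lines.length - start) start lines.length
          (le_refl _) hsn (le_refl _) hPn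
        have hee : bsearchB p t (lines.length - start) start lines.length = e := by
          rcases lt_trichotomy (bsearchB p t (lines.length - start) start lines.length) e with h | h | h
          · have := he4 _ hb1 h; omega
          · exact h
          · have := hb4 e he1 h; omega
        rw [hee, hstep]
        have hih := ih (e + 1) (by omega) (by omega)
        rw [show e + 1 - 1 = e from by omega] at hih
        simp only [List.map_append, List.map_cons] at hih ⊢
        rw [← hih]
        simp [fChunk]
    · have hdrop : lines.drop (start - 1) = [] := by
        rw [List.drop_eq_nil_iff]; omega
      simp only [chunkB_build]
      rw [if_neg hsn, hdrop]
      simp [chunkB_bounds, hsn]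

-- ===== VERDICT (by name: the statement is the Claim_ definition above) =====
theorem chunk_content_generator_spec : Claim_equal_chunk_content_generator := by
  intro content fp cs _
  unfold Spec_chunk_content_generator chunk_content_generator chunk_content_generator_alt
  set lines := pySplitKE content.toList with hlines
  have hkey := chunk_key fp cs lines lines 1 1 0 [] (le_refl _) (le_refl _) (by simp)
  rw [show (lines.drop (1 - 1)).take (1 - 1) = [] from by simp] at hkey
  simp only [hkey]
  set r := chunkB_bounds cs lines 1 1 0 with hr
  have hb := chunkB_bounds_snd_le cs lines 1 1 0 (le_refl _)
  rw [← hr] at hb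
  have hbuild := build_eq fp cs lines (lines.length + 1) 1 (by omega) (le_refl _)

  rw [show (1 : Nat) - 1 = 0 from rfl, List.drop_zero, ← hr] at hbuild
  rw [← hbuild]
  by_cases hfin : r.2 ≤ lines.length
  · -- final chunk present
    have hne : (lines.drop (r.2 - 1)).take (1 + lines.length - r.2) ≠ [] := by
      intro hc
      rw [List.take_eq_nil_iff] at hc
      rcases hc with hc | hc
      · omega
      · rw [List.drop_eq_nil_iff] at hc; omega
    have hslice : PySem.List.slice lines (some ((r.2 : Int) - 1)) (some (lines.length : Int)) =
        (lines.drop (r.2 - 1)).take (1 + lines.length - r.2) := by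
      rw [PySem.List.slice_toNat _ (by omega) (by omega)]
      rw [show ((r.2 : Int) - 1).toNat = r.2 - 1 from by omega,
          show ((lines.length : Int)).toNat = lines.length from by omega]
      congr 1
      omega
    simp [hfin, hne, fChunk, hslice]
  · -- no final chunk: chunk_start ran past the last line, current chunk empty
    have hemp : (lines.drop (r.2 - 1)).take (1 + lines.length - r.2) = [] := by
      apply List.take_eq_nil_iff.mpr
      left
      omega
    simp [hfin, hemp]
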